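-- pv_equiv track=rewrite | github.com/Agent-on-the-Fly/Memento-S | core/skill/execution/tool_bridge/args_processor.py | _maybe_rewrite_bash_input
-- ===== SOURCE A (Python) =====
-- def _maybe_rewrite_bash_input(args: dict) -> dict:
--     """Extract stdin from bash command if needed."""
--     if not isinstance(args, dict):
--         return args
--     if args.get("stdin") is not None:
--         return args
--
--     command = args.get("command")
--     if not isinstance(command, str) or "--input" not in command:
--         return args
--
--     def _extract_quoted_payload(cmd: str) -> tuple[str, str] | None:
--         for quote in ("'", '"'):
--             token = f"--input {quote}"
--             idx = cmd.find(token)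
--             if idx == -1:
--                 continue
--             start = idx + len(token)
--             end = cmd.find(quote, start)
--             if end == -1:
--                 continue
--             payload = cmd[start:end]
--             new_cmd = cmd[:idx] + "--input -" + cmd[end + 1 :]
--             return new_cmd, payload
--         return None
--
--     extracted = _extract_quoted_payload(command)
--     if not extracted:
--         return args
--
--     new_cmd, payload = extracted
--     new_args = dict(args)
--     new_args["command"] = new_cmd
--     new_args["stdin"] = payload
--     return new_args
-- ===== SOURCE B (Python) =====
-- import re
--
-- def _maybe_rewrite_bash_input(args: dict) -> dict:
--     """Extract stdin from bash command if needed (regex-based rewrite)."""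
--     if not isinstance(args, dict) or args.get("stdin") is not None:
--         return args
--     command = args.get("command")
--     if not isinstance(command, str) or "--input" not in command:
--         return args
--     m = re.search(r"--input '([^']*)'", command) or re.search(r'--input "([^"]*)"', command)
--     if m is None:
--         return args
--     return {**args,
--             "command": command[:m.start()] + "--input -" + command[m.end():],
--             "stdin": m.group(1)}
-- ===== Notes on version B (the rewrite author's own statement) =====
-- stated objective: idiomatic
-- what changed: A's hand-rolled _extract_quoted_payload helper (find token, find closing quote, manual index arithmetic over two slices) is replaced by two ordered regex searches (single-quote pattern first, then double-quote) whose match span and group give the rewritten command and stdin payload directly.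
import Mathlib
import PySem

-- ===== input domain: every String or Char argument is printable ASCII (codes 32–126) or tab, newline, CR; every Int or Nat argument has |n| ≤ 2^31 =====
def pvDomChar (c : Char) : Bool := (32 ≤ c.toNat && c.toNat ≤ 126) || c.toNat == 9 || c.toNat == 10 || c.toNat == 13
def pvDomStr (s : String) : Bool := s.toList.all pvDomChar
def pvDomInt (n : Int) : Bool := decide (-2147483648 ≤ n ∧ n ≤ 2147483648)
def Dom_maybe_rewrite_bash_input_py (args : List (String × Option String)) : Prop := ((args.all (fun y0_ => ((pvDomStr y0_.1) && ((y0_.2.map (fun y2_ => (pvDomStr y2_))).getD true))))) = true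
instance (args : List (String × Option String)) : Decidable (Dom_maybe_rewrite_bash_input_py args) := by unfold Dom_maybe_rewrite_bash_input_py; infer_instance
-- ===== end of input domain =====

-- B replaces A's manual find/index extraction loop with two ordered regex-style searches
-- (single quote first), ported as a leftmost-match scan; objective: idiomatic.

-- ===== PORT A =====
-- token "--input " + quote
def pvToken (q : Char) : List Char := "--input ".toList ++ [q]

-- literal port of the body of _extract_quoted_payload for ONE quote character
def pvExtractOneA (q : Char) (cmd : List Char) : Option (List Char × List Char) :=
  let token := pvToken q
  let idx := PySem.Chars.find cmd token
  if idx = -1 then none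
  else
    let start : Int := idx + (token.length : Int)
    let e := PySem.Chars.findFrom cmd [q] start
    if e = -1 then none
    else
      some (PySem.List.slice cmd none (some idx) ++ "--input -".toList ++
              PySem.List.slice cmd (some (e + 1)) none,
            PySem.List.slice cmd (some start) (some e))

-- the for-loop over ("'", '"'): first quote that yields a result wins
def pvExtractQuotedA (cmd : List Char) : Option (List Char × List Char) :=
  match pvExtractOneA '\'' cmd with
  | some r => some r
  | none => pvExtractOneA '"' cmd

def maybe_rewrite_bash_input_py (args : List (String × Option String)) : List (String × Option String) :=
  let d := PySem.Dict.ofList args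
  match d.get? "stdin" with
  | some (some _) => d.items
  | _ =>
    match d.get? "command" with
    | some (some command) =>
      if PySem.Str.isIn "--input" command then
        match pvExtractQuotedA command.toList with
        | some (newCmd, payload) =>
          ((d.insert "command" (some (String.ofList newCmd))).insert "stdin"
              (some (String.ofList payload))).items
        | none => d.items
      else d.items
    | _ => d.items

-- ===== PORT B =====
-- hand port of re.search(r"--input q([^q]*)q", cmd) for a quote character q (PySem has no
-- regex): scan left to right; at the leftmost position where the token "--input q" matches
-- and a closing q follows, return (m.start(), m.end(), m.group(1)). Exact for this pattern.
-- the pattern "--input q" of B's regex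
def pvPatternB (q : Char) : List Char := ['-', '-', 'i', 'n', 'p', 'u', 't', ' '] ++ [q]

-- args.get(k) for a dict whose values are Optional[str]: missing key and null both give none
def pvGetB (d : PySem.Dict String (Option String)) (k : String) : Option String :=
  (d.get? k).getD none

def pvReSearchB (q : Char) (tok : List Char) : List Char → Nat → Option (Nat × Nat × List Char)
  | [], _ => none
  | c :: cs, pos =>
    if tok.isPrefixOf (c :: cs) then
      let after := (c :: cs).drop tok.length
      let j := PySem.Chars.find after [q]
      if j = -1 then pvReSearchB q tok cs (pos + 1)
      else some (pos, pos + tok.length + j.toNat + 1, after.take j.toNat)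
    else pvReSearchB q tok cs (pos + 1)

-- re.search single-quote pattern or-else double-quote pattern
def pvSearchInputB (cmd : List Char) : Option (Nat × Nat × List Char) :=
  (pvReSearchB '\'' (pvPatternB '\'') cmd 0).orElse
    (fun _ => pvReSearchB '"' (pvPatternB '"') cmd 0)

def maybe_rewrite_bash_input_py_alt (args : List (String × Option String)) : List (String × Option String) :=
  let d := PySem.Dict.ofList args
  if (pvGetB d "stdin").isSome then d.items
  else
    match pvGetB d "command" with
    | none => d.items
    | some command =>
      if PySem.Str.isIn "--input" command then
        match pvSearchInputB command.toList with
        | none => d.items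
        | some (s, e, grp) =>
          ((d.insert "command"
              (some (String.ofList (command.toList.take s ++ "--input -".toList ++
                      command.toList.drop e)))).insert "stdin" (some (String.ofList grp))).items
      else d.items

-- ===== PRECONDITION & SPEC =====
def Spec_maybe_rewrite_bash_input_py (args : List (String × Option String)) (out : List (String × Option String)) : Prop := out = maybe_rewrite_bash_input_py_alt args
instance (args : List (String × Option String)) (out : List (String × Option String)) : Decidable (Spec_maybe_rewrite_bash_input_py args out) := by unfold Spec_maybe_rewrite_bash_input_py; infer_instance

-- ===== CLAIM (what is proved, stated in full; the proofs are below) =====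
def Claim_equal_maybe_rewrite_bash_input_py : Prop := ∀ (args : List (String × Option String)), Dom_maybe_rewrite_bash_input_py args → Spec_maybe_rewrite_bash_input_py args (maybe_rewrite_bash_input_py args)

-- ===== LEMMAS AND PROOFS =====

-- find points at n when the needle is a prefix of drop n and at no earlier position
theorem pv_find_eq_of {s tok : List Char} {n : Nat}
    (hp : tok <+: List.drop n s) (hmin : ∀ m < n, ¬ tok <+: List.drop m s) :
    PySem.Chars.find s tok = (n : Int) := by
  have hin : PySem.Chars.isIn tok s = true :=
    (PySem.Chars.exists_prefix_drop_iff_isIn tok s).mp ⟨n, hp⟩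
  have hinf : tok <:+: s := (PySem.Chars.isIn_iff_infix tok s).mp hin
  have h0 : 0 ≤ PySem.Chars.find s tok := (PySem.Chars.find_nonneg_iff s tok).mpr hinf
  obtain ⟨h1, h2⟩ := PySem.Chars.find_spec h0
  rcases Nat.lt_trichotomy (PySem.Chars.find s tok).toNat n with h | h | h
  · exact absurd h1 (hmin _ h)
  · omega
  · exact absurd hp (h2 n h)

theorem pv_find_of_prefix {s tok : List Char} (h : tok <+: s) :
    PySem.Chars.find s tok = 0 := by
  have := pv_find_eq_of (n := 0) (by simpa using h) (by omega)
  simpa using this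

theorem pv_find_cons {c : Char} {cs tok : List Char} (h : ¬ tok <+: c :: cs) :
    PySem.Chars.find (c :: cs) tok =
      if PySem.Chars.find cs tok = -1 then -1 else PySem.Chars.find cs tok + 1 := by
  split_ifs with h1
  · rw [PySem.Chars.find_eq_neg_one_iff] at h1 ⊢
    intro hinf
    rcases List.infix_cons_iff.mp hinf with h2 | h2
    · exact h h2
    · exact h1 h2
  · have h0 : 0 ≤ PySem.Chars.find cs tok := by
      have := PySem.Chars.neg_one_le_find cs tok; omega
    obtain ⟨hp, hmin⟩ := PySem.Chars.find_spec h0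
    have heq : PySem.Chars.find (c :: cs) tok = (((PySem.Chars.find cs tok).toNat + 1 : Nat) : Int) := by
      apply pv_find_eq_of
      · simpa using hp
      · intro m hm
        match m with
        | 0 => simpa using h
        | m' + 1 =>
          have : m' < (PySem.Chars.find cs tok).toNat := by omega
          simpa using hmin m' this
    rw [heq]; omega

-- a singleton needle occurs iff its character is a member
theorem pv_mem_iff_singleton_infix (q : Char) (l : List Char) : q ∈ l ↔ [q] <:+: l := by
  constructor
  · intro h
    obtain ⟨s, t, rfl⟩ := List.append_of_mem h
    exact ⟨s, t, by simp⟩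
  · intro h
    exact List.singleton_sublist.mp h.sublist

-- if "base ++ [q]" occurs anywhere, q occurs at or after position base.length
theorem pv_q_mem_of_tok_prefix {base : List Char} {q : Char} {l : List Char} {i : Nat}
    (h : (base ++ [q]) <+: List.drop i l) : q ∈ List.drop base.length l := by
  obtain ⟨rest, hrest⟩ := h
  have h1 : q ∈ List.drop base.length (List.drop i l) := by
    rw [← hrest, List.append_assoc, List.drop_left]
    simp
  rw [List.drop_drop, Nat.add_comm] at h1
  have hsub := List.drop_suffix i (List.drop base.length l)
  rw [List.drop_drop] at hsub
  exact hsub.subset h1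

-- the leftmost-match scan of B equals A's find/findFrom computation
theorem pv_searchB_eq_core (q : Char) (base : List Char) (s : List Char) : ∀ (pos : Nat),
    pvReSearchB q (base ++ [q]) s pos =
      (let idx := PySem.Chars.find s (base ++ [q])
       if idx = -1 then none
       else
         let e := PySem.Chars.findFrom s [q] (idx + ((base ++ [q]).length : Int))
         if e = -1 then none
         else some (pos + idx.toNat, pos + e.toNat + 1,
             (List.drop (idx.toNat + (base ++ [q]).length) s).take
               (e.toNat - (idx.toNat + (base ++ [q]).length)))) := by
  induction s with
  | nil =>
    intro pos
    have hfe : PySem.Chars.find [] (base ++ [q]) = -1 := by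
      rw [PySem.Chars.find_eq_neg_one_iff, List.infix_nil]
      simp
    simp [pvReSearchB, hfe]
  | cons c cs ih =>
    intro pos
    by_cases hpre : (base ++ [q]) <+: (c :: cs)
    · have hpreB : (base ++ [q]).isPrefixOf (c :: cs) = true :=
        List.isPrefixOf_iff_prefix.mpr hpre
      have hfind0 : PySem.Chars.find (c :: cs) (base ++ [q]) = 0 := pv_find_of_prefix hpre
      have hlen : (base ++ [q]).length ≤ (c :: cs).length := hpre.length_le
      have hafter : List.drop (base ++ [q]).length (c :: cs) = List.drop base.length cs := by
        simp
      have hff : PySem.Chars.findFrom (c :: cs) [q] ((0 : Int) + ((base ++ [q]).length : Int)) =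
          if PySem.Chars.find (List.drop base.length cs) [q] = -1 then -1
          else ((base ++ [q]).length : Int) + PySem.Chars.find (List.drop base.length cs) [q] := by
        rw [zero_add]
        have h := PySem.Chars.findFrom_natCast (c :: cs) [q] (base ++ [q]).length hlen
        rw [hafter] at h
        exact h
      set J := PySem.Chars.find (List.drop base.length cs) [q] with hJ
      simp only [hfind0, if_neg (show (0 : Int) ≠ -1 by omega), hff]
      by_cases hj : J = -1
      · -- token matches here but no closing quote afterwards: neither side finds anything
        have hnone : PySem.Chars.find cs (base ++ [q]) = -1 := by
          rw [PySem.Chars.find_eq_neg_one_iff]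
          intro hinf
          obtain ⟨i, hpi⟩ : ∃ i, (base ++ [q]) <+: List.drop i cs :=
            (PySem.Chars.exists_prefix_drop_iff_isIn (base ++ [q]) cs).mpr
              ((PySem.Chars.isIn_iff_infix (base ++ [q]) cs).mpr hinf)
          have hmem : q ∈ List.drop base.length cs := pv_q_mem_of_tok_prefix hpi
          rw [PySem.Chars.find_eq_neg_one_iff] at hj
          exact hj ((pv_mem_iff_singleton_infix q _).mp hmem)
        have hstep : pvReSearchB q (base ++ [q]) (c :: cs) pos =
            pvReSearchB q (base ++ [q]) cs (pos + 1) := by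
          simp only [pvReSearchB, hpreB, hafter, ← hJ, hj]
          simp
        rw [hstep, ih (pos + 1)]
        simp [hnone, hj]
      · have hj0 : (0 : Int) ≤ J := by
          have := PySem.Chars.neg_one_le_find (List.drop base.length cs) [q]
          rw [← hJ] at this
          omega
        have hstep : pvReSearchB q (base ++ [q]) (c :: cs) pos =
            some (pos, pos + (base ++ [q]).length + J.toNat + 1,
              (List.drop base.length cs).take J.toNat) := by
          simp only [pvReSearchB, hpreB, hafter, ← hJ, hj]
          simp
        rw [hstep, if_neg hj, if_neg (show ((base ++ [q]).length : Int) + J ≠ -1 by omega)]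
        refine congrArg some (Prod.ext ?_ (Prod.ext ?_ ?_))
        · show pos = pos + (0 : Int).toNat
          omega
        · show pos + (base ++ [q]).length + J.toNat + 1 =
            pos + (((base ++ [q]).length : Int) + J).toNat + 1
          omega
        · show (List.drop base.length cs).take J.toNat =
            (List.drop ((0 : Int).toNat + (base ++ [q]).length) (c :: cs)).take
              ((((base ++ [q]).length : Int) + J).toNat - ((0 : Int).toNat + (base ++ [q]).length))
          rw [Int.toNat_zero, Nat.zero_add, hafter]
          congr 1
          omega
    · have hpreB : (base ++ [q]).isPrefixOf (c :: cs) = false := by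
        cases hb : (base ++ [q]).isPrefixOf (c :: cs)
        · rfl
        · exact absurd (List.isPrefixOf_iff_prefix.mp hb) hpre
      have hstep : pvReSearchB q (base ++ [q]) (c :: cs) pos =
          pvReSearchB q (base ++ [q]) cs (pos + 1) := by
        simp only [pvReSearchB, hpreB]
        simp
      rw [hstep, ih (pos + 1), pv_find_cons hpre]
      by_cases h1 : PySem.Chars.find cs (base ++ [q]) = -1
      · simp [h1]
      · have h0 : 0 ≤ PySem.Chars.find cs (base ++ [q]) := by
          have := PySem.Chars.neg_one_le_find cs (base ++ [q]); omega
        obtain ⟨hp, _⟩ := PySem.Chars.find_spec h0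
        set i := PySem.Chars.find cs (base ++ [q]) with hi
        have hlen' : i.toNat + (base ++ [q]).length ≤ cs.length := by
          have h2 := hp.length_le
          rw [List.length_drop] at h2
          have h3 : i.toNat ≤ cs.length := by
            have := PySem.Chars.find_le_length cs (base ++ [q])
            rw [← hi] at this
            omega
          omega
        have hdropeq : List.drop (i.toNat + 1 + (base ++ [q]).length) (c :: cs) =
            List.drop (i.toNat + (base ++ [q]).length) cs := by
          rw [show i.toNat + 1 + (base ++ [q]).length = (i.toNat + (base ++ [q]).length) + 1 by omega]
          rfl
        set F := PySem.Chars.find (List.drop (i.toNat + (base ++ [q]).length) cs) [q] with hF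
        have hkc : PySem.Chars.findFrom (c :: cs) [q] ((i + 1) + ((base ++ [q]).length : Int)) =
            if F = -1 then -1
            else ((i.toNat + 1 + (base ++ [q]).length : Nat) : Int) + F := by
          have hcast : (i + 1) + ((base ++ [q]).length : Int) =
              ((i.toNat + 1 + (base ++ [q]).length : Nat) : Int) := by push_cast; omega
          rw [hcast]
          have h := PySem.Chars.findFrom_natCast (c :: cs) [q]
            (i.toNat + 1 + (base ++ [q]).length) (by simp only [List.length_cons]; omega)
          rw [hdropeq, ← hF] at h
          exact h
        have hkcs : PySem.Chars.findFrom cs [q] (i + ((base ++ [q]).length : Int)) =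
            if F = -1 then -1
            else ((i.toNat + (base ++ [q]).length : Nat) : Int) + F := by
          have hcast : i + ((base ++ [q]).length : Int) =
              ((i.toNat + (base ++ [q]).length : Nat) : Int) := by push_cast; omega
          rw [hcast]
          have h := PySem.Chars.findFrom_natCast cs [q] (i.toNat + (base ++ [q]).length) hlen'
          rw [← hF] at h
          exact h
        simp only [if_neg h1, if_neg (show ¬ (i + 1 = -1) by omega), hkc, hkcs]
        by_cases hf : F = -1
        · simp [hf]
        · have hf0 : (0 : Int) ≤ F := by
            have := PySem.Chars.neg_one_le_find (List.drop (i.toNat + (base ++ [q]).length) cs) [q]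
            rw [← hF] at this
            omega
          rw [if_neg hf, if_neg hf,
            if_neg (show ((i.toNat + 1 + (base ++ [q]).length : Nat) : Int) + F ≠ -1 by omega),
            if_neg (show ((i.toNat + (base ++ [q]).length : Nat) : Int) + F ≠ -1 by omega)]
          refine congrArg some (Prod.ext ?_ (Prod.ext ?_ ?_))
          · show pos + 1 + i.toNat = pos + (i + 1).toNat
            omega
          · show pos + 1 + (((i.toNat + (base ++ [q]).length : Nat) : Int) + F).toNat + 1 =
              pos + (((i.toNat + 1 + (base ++ [q]).length : Nat) : Int) + F).toNat + 1
            omega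
          · show (List.drop (i.toNat + (base ++ [q]).length) cs).take
                ((((i.toNat + (base ++ [q]).length : Nat) : Int) + F).toNat -
                  (i.toNat + (base ++ [q]).length)) =
              (List.drop ((i + 1).toNat + (base ++ [q]).length) (c :: cs)).take
                ((((i.toNat + 1 + (base ++ [q]).length : Nat) : Int) + F).toNat -
                  ((i + 1).toNat + (base ++ [q]).length))
            rw [show (i + 1).toNat + (base ++ [q]).length = i.toNat + 1 + (base ++ [q]).length by omega,
              hdropeq]
            congr 1
            omega

-- A's single-quote extraction equals B's search, rendered as (new command, payload)
theorem pv_extractOneA_eq (q : Char) (cmd : List Char) :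
    pvExtractOneA q cmd =
      (pvReSearchB q (pvToken q) cmd 0).map
        (fun r => (cmd.take r.1 ++ "--input -".toList ++ cmd.drop r.2.1, r.2.2)) := by
  have hTok : pvToken q = "--input ".toList ++ [q] := rfl
  rw [hTok, pv_searchB_eq_core q "--input ".toList cmd 0]
  simp only [pvExtractOneA, pvToken]
  by_cases h1 : PySem.Chars.find cmd ("--input ".toList ++ [q]) = -1
  · rw [if_pos h1, if_pos h1, Option.map_none]
  · have h0 : 0 ≤ PySem.Chars.find cmd ("--input ".toList ++ [q]) := by
      have := PySem.Chars.neg_one_le_find cmd ("--input ".toList ++ [q]); omega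
    obtain ⟨hp, _⟩ := PySem.Chars.find_spec h0
    set i := PySem.Chars.find cmd ("--input ".toList ++ [q]) with hi
    have hlen : i.toNat + ("--input ".toList ++ [q]).length ≤ cmd.length := by
      have h2 := hp.length_le
      rw [List.length_drop] at h2
      have h3 : i ≤ (cmd.length : Int) := by
        rw [hi]; exact PySem.Chars.find_le_length cmd ("--input ".toList ++ [q])
      omega
    have hcast : i + (("--input ".toList ++ [q]).length : Int) =
        ((i.toNat + ("--input ".toList ++ [q]).length : Nat) : Int) := by push_cast; omega
    set F := PySem.Chars.find
        (List.drop (i.toNat + ("--input ".toList ++ [q]).length) cmd) [q] with hF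
    have hff : PySem.Chars.findFrom cmd [q] (i + (("--input ".toList ++ [q]).length : Int)) =
        if F = -1 then -1
        else ((i.toNat + ("--input ".toList ++ [q]).length : Nat) : Int) + F := by
      rw [hcast]
      have h := PySem.Chars.findFrom_natCast cmd [q]
        (i.toNat + ("--input ".toList ++ [q]).length) hlen
      rw [← hF] at h
      exact h
    rw [if_neg h1, if_neg h1, hff]
    by_cases h2 : F = -1
    · rw [if_pos h2]; simp
    · have hf0 : (0 : Int) ≤ F := by
        have := PySem.Chars.neg_one_le_find
          (List.drop (i.toNat + ("--input ".toList ++ [q]).length) cmd) [q]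
        rw [← hF] at this
        omega
      rw [if_neg h2,
        if_neg (show ((i.toNat + ("--input ".toList ++ [q]).length : Nat) : Int) + F ≠ -1 by omega),
        if_neg (show ((i.toNat + ("--input ".toList ++ [q]).length : Nat) : Int) + F ≠ -1 by omega),
        Option.map_some]
      refine congrArg some (Prod.ext ?_ ?_)
      · show PySem.List.slice cmd none (some i) ++ "--input -".toList ++
            PySem.List.slice cmd
              (some (((i.toNat + ("--input ".toList ++ [q]).length : Nat) : Int) + F + 1)) none =
          cmd.take (0 + i.toNat) ++ "--input -".toList ++
            cmd.drop (0 + ((((i.toNat + ("--input ".toList ++ [q]).length : Nat) : Int) + F).toNat) + 1)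
        rw [PySem.List.slice_to cmd h0, PySem.List.slice_from cmd (by omega), Nat.zero_add,
          Nat.zero_add]
        congr 2
        omega
      · show PySem.List.slice cmd (some (i + (("--input ".toList ++ [q]).length : Int)))
            (some (((i.toNat + ("--input ".toList ++ [q]).length : Nat) : Int) + F)) =
          (List.drop (i.toNat + ("--input ".toList ++ [q]).length) cmd).take
            ((((i.toNat + ("--input ".toList ++ [q]).length : Nat) : Int) + F).toNat -
              (i.toNat + ("--input ".toList ++ [q]).length))
        rw [hcast, show ((i.toNat + ("--input ".toList ++ [q]).length : Nat) : Int) + F =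
            (((i.toNat + ("--input ".toList ++ [q]).length + F.toNat : Nat)) : Int) by omega,
          PySem.List.slice_natCast]
        congr 1

-- A's quote loop equals B's ordered or-else of the two searches
theorem pv_quoted_eq (cmd : List Char) :
    pvExtractQuotedA cmd =
      (pvSearchInputB cmd).map
        (fun r => (cmd.take r.1 ++ "--input -".toList ++ cmd.drop r.2.1, r.2.2)) := by
  unfold pvExtractQuotedA pvSearchInputB
  rw [show pvPatternB '\'' = pvToken '\'' from rfl, show pvPatternB '"' = pvToken '"' from rfl,
    pv_extractOneA_eq, pv_extractOneA_eq]
  cases pvReSearchB '\'' (pvToken '\'') cmd 0 with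
  | none => simp [Option.orElse]
  | some r => simp [Option.orElse]

-- ===== VERDICT (by name: the statement is the Claim_ definition above) =====
theorem maybe_rewrite_bash_input_py_spec : Claim_equal_maybe_rewrite_bash_input_py := by
  intro args _
  show maybe_rewrite_bash_input_py args = maybe_rewrite_bash_input_py_alt args
  simp only [maybe_rewrite_bash_input_py, maybe_rewrite_bash_input_py_alt, pvGetB]
  cases hs : (PySem.Dict.ofList args).get? "stdin" with
  | some v =>
    cases v with
    | some s => simp
    | none =>
      cases hc : (PySem.Dict.ofList args).get? "command" with
      | none => simp
      | some w =>
        cases w with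
        | none => simp
        | some command =>
          simp only [Option.getD_some, Option.isSome_none,
            Bool.false_eq_true, if_false]
          by_cases hin : PySem.Str.isIn "--input" command
          · simp only [hin, if_true]
            rw [pv_quoted_eq]
            cases pvSearchInputB command.toList with
            | none => rfl
            | some r => obtain ⟨a, b, g⟩ := r; rfl
          · simp at hin
            simp [hin]
  | none =>
    cases hc : (PySem.Dict.ofList args).get? "command" with
    | none => simp
    | some w =>
      cases w with
      | none => simp
      | some command =>
        simp only [Option.getD_some, Option.getD_none, Option.isSome_none,
          Bool.false_eq_true, if_false]
        by_cases hin : PySem.Str.isIn "--input" command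
        · simp only [hin, if_true]
          rw [pv_quoted_eq]
          cases pvSearchInputB command.toList with
          | none => rfl
          | some r => obtain ⟨a, b, g⟩ := r; rfl
        · simp at hin
          simp [hin]
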